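-- pv_equiv track=rewrite | github.com/thalida/adventofcode | 2018/5/2/run-string.py | poly_reduce
-- ===== SOURCE A (Python) =====
-- def poly_reduce(s, skip):
--     i = 0
--     while True:
--         try:
--             a, b = (s[i], s[i+1])
--             if a.lower() == skip:
--                 s = s[:i] + s[i+1:]
--                 continue
--             if b.lower() == skip:
--                 s = s[:i+1] + s[i+2:]
--                 continue
--         except IndexError:
--             break
--
--         if abs(ord(a) - ord(b)) == 32:
--             s = s[:i] + s[i+2:]
--             i = i - 1 if i > 0 else 0
--         else:
--             i += 1
--
--     return len(s)
-- ===== SOURCE B (Python) =====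
-- def poly_reduce(s, skip):
--     stack = []
--     for c in s:
--         if c.lower() == skip:
--             continue
--         if stack and abs(ord(stack[-1]) - ord(c)) == 32:
--             stack.pop()
--         else:
--             stack.append(c)
--     return len(stack)
-- ===== Notes on version B (the rewrite author's own statement) =====
-- stated objective: alternative
-- what changed: Replaces the index-juggling while-loop that rebuilds the string by slicing on every removal with a single left-to-right pass that drops the skipped letter and pushes/pops reacting units on a stack.
-- intended difference: On inputs whose final character is the skipped letter and whose remaining units all react away in pairs, A returns 1 because its (s[i], s[i+1]) lookahead hits IndexError and breaks before that final letter is ever filtered, while B returns 0, the intended length of the fully reacted, letter-filtered polymer. — e.g. on poly_reduce("a", "a"): A returns 1, B returns 0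
import Mathlib
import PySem

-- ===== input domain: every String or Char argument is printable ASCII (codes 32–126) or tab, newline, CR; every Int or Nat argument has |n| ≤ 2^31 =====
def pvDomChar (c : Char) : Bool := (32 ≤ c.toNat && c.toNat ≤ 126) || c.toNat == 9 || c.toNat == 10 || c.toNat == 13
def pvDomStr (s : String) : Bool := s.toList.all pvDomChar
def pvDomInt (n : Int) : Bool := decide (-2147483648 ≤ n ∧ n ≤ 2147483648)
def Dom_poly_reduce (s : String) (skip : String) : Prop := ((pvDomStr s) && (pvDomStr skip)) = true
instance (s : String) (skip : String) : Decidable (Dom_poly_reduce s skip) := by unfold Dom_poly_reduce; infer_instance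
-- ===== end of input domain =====

-- B replaces A's slice-and-rescan while-loop by a single left-to-right stack pass; A and B agree
-- everywhere except the D_ corner stated below, where B returns the intended count.

-- ===== PORT A =====
-- A-side helper: A's while-loop over the character list; `i` is A's index (it never goes below 0,
-- Python's `i = i - 1 if i > 0 else 0` is exactly Nat subtraction's guarded form, kept literally).
-- `fuel` only makes the recursion structural: it starts at 2*len(s)+1, an upper bound on the number
-- of iterations (each iteration shrinks the measure 2*len(s)-i), so the 0 case is never reached.
def polyLoopA (skip : String) : Nat → List Char → Nat → Int
  | 0, l, _ => (l.length : Int)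
  | fuel + 1, l, i =>
    match PySem.List.pyGet? l (i : Int), PySem.List.pyGet? l ((i : Int) + 1) with
    | some a, some b =>
      if PySem.Str.lower (String.ofList [a]) == skip then
        polyLoopA skip fuel
          (PySem.List.slice l none (some (i : Int)) ++ PySem.List.slice l (some ((i : Int) + 1)) none) i
      else if PySem.Str.lower (String.ofList [b]) == skip then
        polyLoopA skip fuel
          (PySem.List.slice l none (some ((i : Int) + 1)) ++ PySem.List.slice l (some ((i : Int) + 2)) none) i
      else if ((a.toNat : Int) - (b.toNat : Int)).natAbs == 32 then
        polyLoopA skip fuel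
          (PySem.List.slice l none (some (i : Int)) ++ PySem.List.slice l (some ((i : Int) + 2)) none)
          (if i > 0 then i - 1 else 0)
      else
        polyLoopA skip fuel l (i + 1)
    | _, _ => (l.length : Int)          -- IndexError on s[i] or s[i+1] → break; return len(s)

def poly_reduce (s : String) (skip : String) : Int :=
  polyLoopA skip (2 * s.toList.length + 1) s.toList 0

-- ===== PORT B =====
-- B-side helper: one loop step; the Lean list head is the top of Python's `stack`.
def polyStepB (skip : String) (stack : List Char) (c : Char) : List Char :=
  if PySem.Str.lower (String.ofList [c]) == skip then stack
  else
    match stack with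
    | d :: rest => if ((d.toNat : Int) - c.toNat).natAbs == 32 then rest else c :: d :: rest
    | [] => [c]

def poly_reduce_alt (s : String) (skip : String) : Int :=
  ((s.toList.foldl (polyStepB skip) []).length : Int)

-- ===== PRECONDITION & SPEC =====
-- D_-side helpers, spec-level (used by no port): two units react when their codes differ by 32,
-- and a word "fully reacts" when repeatedly removing the leftmost adjacent reacting pair reaches
-- the empty word.  The Nat argument of pvFullyReacts only makes the recursion structural: each
-- removal shortens the word by 2, so |l| removal rounds always suffice.
def pvReacts (a b : Char) : Bool := max a.toNat b.toNat - min a.toNat b.toNat == 32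
def pvStrip1 : List Char → Option (List Char)
  | a :: b :: r => if pvReacts a b then some r else (pvStrip1 (b :: r)).map (a :: ·)
  | _ => none
def pvFullyReacts : Nat → List Char → Bool
  | _, [] => true
  | 0, _ => false
  | f + 1, l => match pvStrip1 l with
    | some l' => pvFullyReacts f l'
    | none => false

-- On inputs whose final character is the skipped letter and whose remaining units all react away
-- in pairs, A returns 1 (its (s[i], s[i+1]) lookahead hits IndexError and breaks before that final
-- letter is ever filtered) while B returns 0, the intended length of the fully reacted,
-- letter-filtered polymer.
def D_poly_reduce (s : String) (skip : String) : Prop :=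
  (s.toList.getLast?.any fun c => PySem.Chars.lower [c] == skip.toList) = true ∧
  pvFullyReacts s.toList.length
    (s.toList.filter fun c => !(PySem.Chars.lower [c] == skip.toList)) = true
instance (s : String) (skip : String) : Decidable (D_poly_reduce s skip) := by
  unfold D_poly_reduce; infer_instance

def Spec_poly_reduce (s : String) (skip : String) (out : Int) : Prop :=
  ¬ D_poly_reduce s skip → out = poly_reduce_alt s skip
instance (s : String) (skip : String) (out : Int) : Decidable (Spec_poly_reduce s skip out) := by
  unfold Spec_poly_reduce; infer_instance

def pvDiffWitness_poly_reduce : String × String := ("a", "a")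
def pvDiffWitnessOut_poly_reduce : Int × Int := (1, 0)

-- ===== CLAIM (what is proved, stated in full; the proofs are below) =====
def Claim_unchanged_poly_reduce : Prop := ∀ (s : String) (skip : String), Dom_poly_reduce s skip → Spec_poly_reduce s skip (poly_reduce s skip)
def Claim_changed_poly_reduce : Prop := Dom_poly_reduce (pvDiffWitness_poly_reduce.1) (pvDiffWitness_poly_reduce.2) ∧ D_poly_reduce (pvDiffWitness_poly_reduce.1) (pvDiffWitness_poly_reduce.2) ∧ poly_reduce (pvDiffWitness_poly_reduce.1) (pvDiffWitness_poly_reduce.2) = pvDiffWitnessOut_poly_reduce.1 ∧ poly_reduce_alt (pvDiffWitness_poly_reduce.1) (pvDiffWitness_poly_reduce.2) = pvDiffWitnessOut_poly_reduce.2 ∧ pvDiffWitnessOut_poly_reduce.1 ≠ pvDiffWitnessOut_poly_reduce.2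
def Claim_exact_poly_reduce : Prop := ∀ (s : String) (skip : String), Dom_poly_reduce s skip → D_poly_reduce s skip → poly_reduce s skip ≠ poly_reduce_alt s skip

-- ===== LEMMAS AND PROOFS =====

-- proof-side abbreviation: B's loop from an arbitrary stack
def pvRun (skip : String) (st r : List Char) : List Char := r.foldl (polyStepB skip) st

-- proof-side predicates: the skip test, the reaction test, the last-character test
def pvSk (skip : String) (c : Char) : Bool := decide (PySem.Chars.lower [c] = skip.toList)
def pvRx (a b : Char) : Bool := decide (a.toNat + 32 = b.toNat ∨ b.toNat + 32 = a.toNat)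
def pvLastSk (skip : String) (r : List Char) : Bool :=
  match r.getLast? with
  | some c => pvSk skip c
  | none => false
def pvQuirk (skip : String) (l : List Char) : Bool :=
  pvLastSk skip l && (pvRun skip [] l).isEmpty

-- the skip-indifferent stack step and run (B's step restricted to non-skip letters)
def pureStep (st : List Char) (c : Char) : List Char :=
  match st with
  | d :: t => if pvRx d c then t else c :: d :: t
  | [] => [c]
def pureRun (st l : List Char) : List Char := l.foldl pureStep st

lemma pvSk_eq (skip : String) (c : Char) :
    pvSk skip c = (PySem.Str.lower (String.ofList [c]) == skip) := by
  unfold pvSk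
  rcases h : (PySem.Str.lower (String.ofList [c]) == skip) with _ | _
  · simp only [decide_eq_false_iff_not]
    intro hl
    apply (by simpa using h : ¬ PySem.Str.lower (String.ofList [c]) = skip)
    apply String.toList_inj.mp
    simpa using hl
  · simp only [decide_eq_true_iff]
    have h' : PySem.Str.lower (String.ofList [c]) = skip := by simpa using h
    have := congrArg String.toList h'
    simpa using this

lemma pvRx_eq (a b : Char) :
    pvRx a b = (((a.toNat : Int) - (b.toNat : Int)).natAbs == 32) := by
  unfold pvRx
  rcases h : (((a.toNat : Int) - (b.toNat : Int)).natAbs == 32) with _ | _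
  · simp only [decide_eq_false_iff_not]
    intro hl
    have : ((a.toNat : Int) - (b.toNat : Int)).natAbs ≠ 32 := by simpa using h
    omega
  · simp only [decide_eq_true_iff]
    have : ((a.toNat : Int) - (b.toNat : Int)).natAbs = 32 := by simpa using h
    omega

lemma pvRx_symm (a b : Char) : pvRx a b = pvRx b a := by
  unfold pvRx
  exact decide_eq_decide.mpr or_comm

lemma pvReacts_eq (a b : Char) : pvReacts a b = pvRx a b := by
  unfold pvReacts pvRx
  rcases h : decide (a.toNat + 32 = b.toNat ∨ b.toNat + 32 = a.toNat) with _ | _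
  · have : ¬ (a.toNat + 32 = b.toNat ∨ b.toNat + 32 = a.toNat) := by simpa using h
    simpa using by omega
  · have : a.toNat + 32 = b.toNat ∨ b.toNat + 32 = a.toNat := by simpa using h
    simpa using by omega

lemma stepB_eq (skip : String) (st : List Char) (c : Char) :
    polyStepB skip st c =
      if pvSk skip c then st
      else match st with
        | d :: rest => if pvRx d c then rest else c :: d :: rest
        | [] => [c] := by
  cases st with
  | nil => simp [polyStepB, pvSk_eq]
  | cons d rest => simp [polyStepB, pvSk_eq, pvRx_eq]

lemma skC_eq (skip : String) (c : Char) :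
    (PySem.Chars.lower [c] == skip.toList) = pvSk skip c := by
  unfold pvSk
  cases h : (PySem.Chars.lower [c] == skip.toList) with
  | false =>
    symm
    simp only [decide_eq_false_iff_not]
    intro hl
    rw [hl] at h
    simp at h
  | true =>
    symm
    simp only [decide_eq_true_iff]
    exact eq_of_beq h

lemma lastAny_eq (skip : String) (l : List Char) :
    (l.getLast?.any fun c => PySem.Chars.lower [c] == skip.toList) = pvLastSk skip l := by
  cases h : l.getLast? with
  | none => simp [pvLastSk, h]
  | some c => simp [pvLastSk, h, skC_eq]

lemma pvRun_nil (skip : String) (st : List Char) : pvRun skip st [] = st := rfl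
lemma pvRun_cons (skip : String) (st : List Char) (c : Char) (r : List Char) :
    pvRun skip st (c :: r) = pvRun skip (polyStepB skip st c) r := rfl

lemma stepB_sk (skip : String) (st : List Char) (c : Char) (h : pvSk skip c = true) :
    polyStepB skip st c = st := by
  rw [stepB_eq, if_pos h]
lemma stepB_nil (skip : String) (c : Char) (h : pvSk skip c = false) :
    polyStepB skip [] c = [c] := by
  rw [stepB_eq]; simp [h]
lemma stepB_pop (skip : String) (st : List Char) (d c : Char)
    (h1 : pvSk skip c = false) (h2 : pvRx d c = true) :
    polyStepB skip (d :: st) c = st := by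
  rw [stepB_eq]; simp [h1, h2]
lemma stepB_push (skip : String) (st : List Char) (d c : Char)
    (h1 : pvSk skip c = false) (h2 : pvRx d c = false) :
    polyStepB skip (d :: st) c = c :: d :: st := by
  rw [stepB_eq]; simp [h1, h2]

lemma stepB_pure (skip : String) (st : List Char) (c : Char) (h : pvSk skip c = false) :
    polyStepB skip st c = pureStep st c := by
  rw [stepB_eq]
  simp only [h, Bool.false_eq_true, if_false]
  cases st <;> rfl

lemma lastSk_nil (skip : String) : pvLastSk skip [] = false := rfl
lemma lastSk_one (skip : String) (c : Char) : pvLastSk skip [c] = pvSk skip c := rfl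
lemma lastSk_cons2 (skip : String) (a b : Char) (r : List Char) :
    pvLastSk skip (a :: b :: r) = pvLastSk skip (b :: r) := by
  simp [pvLastSk, List.getLast?_cons_cons]

lemma getA0 (st r : List Char) :
    PySem.List.pyGet? (st.reverse ++ r) ((st.length : Nat) : Int) = r[0]? := by
  rw [PySem.List.pyGet?_natCast, List.getElem?_append_right (by simp)]
  simp
lemma getA1 (st r : List Char) :
    PySem.List.pyGet? (st.reverse ++ r) (((st.length : Nat) : Int) + 1) = r[1]? := by
  have h : ((st.length : Nat) : Int) + 1 = ((st.length + 1 : Nat) : Int) := by push_cast; ring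
  rw [h, PySem.List.pyGet?_natCast, List.getElem?_append_right (by simp)]
  simp
lemma sl_take0 (st r : List Char) :
    PySem.List.slice (st.reverse ++ r) none (some ((st.length : Nat) : Int)) = st.reverse := by
  rw [PySem.List.slice_to_natCast]
  rw [show st.length = st.reverse.length by simp]
  exact List.take_left
lemma sl_take1 (st r : List Char) (c : Char) :
    PySem.List.slice (st.reverse ++ c :: r) none (some (((st.length : Nat) : Int) + 1)) =
      st.reverse ++ [c] := by
  have h : ((st.length : Nat) : Int) + 1 = ((st.length + 1 : Nat) : Int) := by push_cast; ring
  rw [h, PySem.List.slice_to_natCast]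
  rw [show st.reverse ++ c :: r = (st.reverse ++ [c]) ++ r by simp]
  rw [show st.length + 1 = (st.reverse ++ [c]).length by simp]
  exact List.take_left
lemma sl_drop1 (st r : List Char) (c : Char) :
    PySem.List.slice (st.reverse ++ c :: r) (some (((st.length : Nat) : Int) + 1)) none = r := by
  have h : ((st.length : Nat) : Int) + 1 = ((st.length + 1 : Nat) : Int) := by push_cast; ring
  rw [h, PySem.List.slice_from_natCast]
  rw [show st.reverse ++ c :: r = (st.reverse ++ [c]) ++ r by simp]
  rw [show st.length + 1 = (st.reverse ++ [c]).length by simp]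
  exact List.drop_left
lemma sl_drop2 (st r : List Char) (c d : Char) :
    PySem.List.slice (st.reverse ++ c :: d :: r) (some (((st.length : Nat) : Int) + 2)) none = r := by
  have h : ((st.length : Nat) : Int) + 2 = ((st.length + 2 : Nat) : Int) := by push_cast; ring
  rw [h, PySem.List.slice_from_natCast]
  rw [show st.reverse ++ c :: d :: r = (st.reverse ++ [c, d]) ++ r by simp]
  rw [show st.length + 2 = (st.reverse ++ [c, d]).length by simp]
  exact List.drop_left

-- Main simulation invariant: A's loop at state (stack.reverse ++ r, |stack|) computes B's stack run,
-- plus 1 exactly when the run empties and the last unread character is the skipped letter.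
set_option maxHeartbeats 2000000 in
lemma loopA_eq (skip : String) : ∀ (fuel : Nat) (st r : List Char),
    st.length + 2 * r.length ≤ fuel →
    List.IsChain (fun a b => pvRx a b = false) st →
    (∀ c ∈ st, pvSk skip c = false) →
    (∀ d c, st.head? = some d → r.head? = some c → pvRx d c = false ∧ pvSk skip c = false) →
    polyLoopA skip fuel (st.reverse ++ r) st.length =
      ((pvRun skip st r).length : Int) +
        (if ((pvRun skip st r).isEmpty && pvLastSk skip r) = true then 1 else 0) := by
  intro fuel
  induction fuel with
  | zero =>
    intro st r hm _ _ _
    have h1 : st = [] := List.length_eq_zero_iff.mp (by omega)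
    have h2 : r = [] := List.length_eq_zero_iff.mp (by omega)
    subst h1; subst h2; rfl
  | succ n ih =>
    intro st r hm hch hsk hhd
    cases r with
    | nil =>
      rw [polyLoopA, getA0, getA1]
      simp [pvRun_nil, lastSk_nil]
    | cons c1 r1 =>
      cases r1 with
      | nil =>
        rw [polyLoopA, getA0, getA1]
        simp only [List.getElem?_cons_zero, List.getElem?_cons_succ, List.getElem?_nil]
        rw [pvRun_cons, pvRun_nil]
        cases st with
        | nil =>
          by_cases hs : pvSk skip c1
          · rw [stepB_sk skip [] c1 hs]
            simp [lastSk_one, hs]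
          · have hs' : pvSk skip c1 = false := by simpa using hs
            rw [stepB_nil skip c1 hs']
            simp [lastSk_one, hs']
        | cons d st' =>
          obtain ⟨hr, hs⟩ := hhd d c1 rfl rfl
          rw [stepB_push skip st' d c1 hs hr]
          simp [lastSk_one]
          omega
      | cons c2 r' =>
        rw [polyLoopA, getA0, getA1]
        simp only [List.getElem?_cons_zero, List.getElem?_cons_succ]
        by_cases hs1 : pvSk skip c1
        · -- s[i] is the skipped letter: A removes it; the stack must be empty here
          have hst : st = [] := by
            cases st with
            | nil => rfl
            | cons d st' =>
              obtain ⟨_, hs⟩ := hhd d c1 rfl rfl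
              rw [hs1] at hs; cases hs
          subst hst
          have hs1' : (PySem.Str.lower (String.ofList [c1]) == skip) = true := by
            rw [← pvSk_eq]; exact hs1
          simp only [List.reverse_nil, List.nil_append, List.length_nil] at *
          rw [show PySem.List.slice (c1 :: c2 :: r') none (some ((0 : Nat) : Int)) =
                ([] : List Char).reverse from sl_take0 [] (c1 :: c2 :: r'),
              show PySem.List.slice (c1 :: c2 :: r') (some (((0 : Nat) : Int) + 1)) none =
                c2 :: r' from sl_drop1 [] (c2 :: r') c1]
          simp only [hs1', if_true, List.reverse_nil, List.nil_append]
          have := ih [] (c2 :: r') (by simp at hm ⊢; omega) List.IsChain.nil (by simp)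
            (by intro d c hd hc; cases hd)
          simp only [List.reverse_nil, List.nil_append, List.length_nil] at this
          rw [this, pvRun_cons skip [] c1 (c2 :: r'), stepB_sk skip [] c1 hs1, lastSk_cons2 skip c1 c2 r']
        · have hs1' : pvSk skip c1 = false := by simpa using hs1
          have hs1'' : (PySem.Str.lower (String.ofList [c1]) == skip) = false := by
            rw [← pvSk_eq]; exact hs1'
          by_cases hs2 : pvSk skip c2
          · -- s[i+1] is the skipped letter: A removes it, state (st, c1 :: r')
            have hs2' : (PySem.Str.lower (String.ofList [c2]) == skip) = true := by
              rw [← pvSk_eq]; exact hs2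
            rw [sl_take1 st (c2 :: r') c1, sl_drop2 st r' c1 c2]
            simp only [hs1'', hs2', if_true, Bool.false_eq_true, if_false]
            rw [show (st.reverse ++ [c1]) ++ r' = st.reverse ++ (c1 :: r') by simp]
            have hhd' : ∀ d c, st.head? = some d → (c1 :: r').head? = some c →
                pvRx d c = false ∧ pvSk skip c = false := by
              intro d c hd hc
              cases hc
              exact hhd d c1 hd rfl
            rw [ih st (c1 :: r') (by simp at hm ⊢; omega) hch hsk hhd']
            have hrun : pvRun skip st (c1 :: c2 :: r') = pvRun skip st (c1 :: r') := by
              rw [pvRun_cons, pvRun_cons, pvRun_cons, stepB_sk skip _ c2 hs2]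
            rw [hrun]
            cases r' with
            | nil =>
              have hne : (pvRun skip st [c1]).isEmpty = false := by
                rw [pvRun_cons, pvRun_nil]
                cases st with
                | nil => rw [stepB_nil skip c1 hs1']; rfl
                | cons d st' =>
                  obtain ⟨hr, _⟩ := hhd d c1 rfl rfl
                  rw [stepB_push skip st' d c1 hs1' hr]; rfl
              rw [hne]
              simp only [Bool.false_and, Bool.false_eq_true, if_false]
            | cons c3 r'' =>
              rw [lastSk_cons2 skip c1 c3 r'', lastSk_cons2 skip c1 c2 (c3 :: r''),
                lastSk_cons2 skip c2 c3 r'']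
          · have hs2' : pvSk skip c2 = false := by simpa using hs2
            have hs2'' : (PySem.Str.lower (String.ofList [c2]) == skip) = false := by
              rw [← pvSk_eq]; exact hs2'
            by_cases hrx : pvRx c1 c2
            · -- the pair reacts: A removes both and steps back
              have hrx' : (((c1.toNat : Int) - (c2.toNat : Int)).natAbs == 32) = true := by
                rw [← pvRx_eq]; exact hrx
              rw [sl_take0 st (c1 :: c2 :: r'), sl_drop2 st r' c1 c2]
              simp only [hs1'', hs2'', hrx', if_true, Bool.false_eq_true, if_false]
              have hrun : pvRun skip st (c1 :: c2 :: r') =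
                  pvRun skip (polyStepB skip (polyStepB skip st c1) c2) r' := by
                rw [pvRun_cons skip st c1 (c2 :: r'), pvRun_cons skip (polyStepB skip st c1) c2 r']
              cases st with
              | nil =>
                simp only [List.reverse_nil, List.nil_append, List.length_nil, gt_iff_lt,
                  lt_self_iff_false, if_false]
                have := ih [] r' (by simp at hm ⊢; omega) List.IsChain.nil (by simp)
                  (by intro d c hd hc; cases hd)
                simp only [List.reverse_nil, List.nil_append, List.length_nil] at this
                rw [this, hrun, stepB_nil skip c1 hs1', stepB_pop skip [] c1 c2 hs2' hrx]
                cases r' with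
                | nil =>
                  rw [lastSk_cons2 skip c1 c2 ([] : List Char), lastSk_one, hs2', lastSk_nil skip]
                | cons c3 r'' =>
                  rw [lastSk_cons2 skip c1 c2 (c3 :: r''), lastSk_cons2 skip c2 c3 r'']
              | cons d st' =>
                obtain ⟨hrd, _⟩ := hhd d c1 rfl rfl
                have hskd : pvSk skip d = false := hsk d (by simp)
                have hch' : List.IsChain (fun a b => pvRx a b = false) st' := hch.tail
                have hhd' : ∀ e c, st'.head? = some e → (d :: r').head? = some c →
                    pvRx e c = false ∧ pvSk skip c = false := by
                  intro e c he hc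
                  cases hc
                  constructor
                  · cases st' with
                    | nil => cases he
                    | cons e' t =>
                      cases he
                      rw [pvRx_symm]
                      exact (List.isChain_cons_cons.mp hch).1
                  · exact hskd
                have harg : (d :: st').reverse ++ r' = st'.reverse ++ (d :: r') := by simp
                have hlen : (if (d :: st').length > 0 then (d :: st').length - 1 else 0) =
                    st'.length := by simp
                rw [harg, hlen, ih st' (d :: r') (by simp at hm ⊢; omega) hch'
                  (fun c hc => hsk c (by simp [hc])) hhd']
                have hstep : polyStepB skip st' d = d :: st' := by
                  cases st' with
                  | nil => rw [stepB_nil skip d hskd]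
                  | cons e t =>
                    rw [stepB_push skip t e d hskd]
                    rw [pvRx_symm]
                    exact (List.isChain_cons_cons.mp hch).1
                have hrun2 : pvRun skip (d :: st') (c1 :: c2 :: r') =
                    pvRun skip st' (d :: r') := by
                  rw [pvRun_cons skip (d :: st') c1 (c2 :: r'),
                    stepB_push skip st' d c1 hs1' hrd,
                    pvRun_cons skip (c1 :: d :: st') c2 r',
                    stepB_pop skip (d :: st') c1 c2 hs2' hrx,
                    pvRun_cons skip st' d r', hstep]
                rw [hrun2]
                cases r' with
                | nil => rw [lastSk_cons2 skip c1 c2 ([] : List Char), lastSk_one, lastSk_one,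
                    hs2', hskd]
                | cons c3 r'' =>
                  rw [lastSk_cons2 skip c1 c2 (c3 :: r''), lastSk_cons2 skip c2 c3 r'',
                    lastSk_cons2 skip d c3 r'']
            · -- no reaction: A advances i, state (c1 :: st, c2 :: r')
              have hrx2 : pvRx c1 c2 = false := by simpa using hrx
              have hrx' : (((c1.toNat : Int) - (c2.toNat : Int)).natAbs == 32) = false := by
                rw [← pvRx_eq]; exact hrx2
              simp only [hs1'', hs2'', hrx', Bool.false_eq_true, if_false]
              have hch' : List.IsChain (fun a b => pvRx a b = false) (c1 :: st) := by
                cases st with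
                | nil => exact List.IsChain.singleton c1
                | cons d st' =>
                  have h1 : pvRx c1 d = false := by
                    rw [pvRx_symm]
                    exact (hhd d c1 rfl rfl).1
                  exact List.isChain_cons_cons.mpr ⟨h1, hch⟩
              have hhd' : ∀ d c, (c1 :: st).head? = some d → (c2 :: r').head? = some c →
                  pvRx d c = false ∧ pvSk skip c = false := by
                intro d c hd hc
                cases hd; cases hc
                exact ⟨hrx2, hs2'⟩
              have harg : st.reverse ++ c1 :: c2 :: r' = (c1 :: st).reverse ++ (c2 :: r') := by
                simp
              have hlen : st.length + 1 = (c1 :: st).length := rfl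
              rw [harg, hlen, ih (c1 :: st) (c2 :: r') (by simp at hm ⊢; omega) hch'
                (by intro c hc; rcases List.mem_cons.mp hc with h | h
                    · subst h; exact hs1'
                    · exact hsk c h) hhd']
              have hstep : polyStepB skip st c1 = c1 :: st := by
                cases st with
                | nil => rw [stepB_nil skip c1 hs1']
                | cons d st' => exact stepB_push skip st' d c1 hs1' (hhd d c1 rfl rfl).1
              have hrun : pvRun skip st (c1 :: c2 :: r') = pvRun skip (c1 :: st) (c2 :: r') := by
                rw [pvRun_cons skip st c1 (c2 :: r'), hstep]
              rw [hrun, lastSk_cons2 skip c1 c2 r']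

lemma poly_reduce_eq (s skip : String) :
    poly_reduce s skip = poly_reduce_alt s skip + (if pvQuirk skip s.toList then 1 else 0) := by
  have h := loopA_eq skip (2 * s.toList.length + 1) [] s.toList (by simp)
    List.IsChain.nil (by simp) (by intro d c hd hc; cases hd)
  simp only [List.reverse_nil, List.nil_append, List.length_nil] at h
  show polyLoopA skip (2 * s.toList.length + 1) s.toList 0 = _
  rw [h]
  unfold poly_reduce_alt pvQuirk
  rw [Bool.and_comm]
  rfl

-- ===== linking the D_ fixpoint "fully reacts" to B's stack run =====

-- B's run over l equals the skip-indifferent run over the skip-filtered l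
lemma run_filter (skip : String) : ∀ (l st : List Char),
    pvRun skip st l = pureRun st (l.filter fun c => !pvSk skip c) := by
  intro l
  induction l with
  | nil => intro st; rfl
  | cons c r ih =>
    intro st
    rw [pvRun_cons]
    by_cases hc : pvSk skip c
    · rw [stepB_sk skip st c hc, List.filter_cons_of_neg (by simp [hc]), ih]
    · have hc' : pvSk skip c = false := by simpa using hc
      rw [stepB_pure skip st c hc', List.filter_cons_of_pos (by simp [hc']), ih]
      rfl

lemma strip1_none_chain : ∀ (l : List Char), pvStrip1 l = none →
    List.IsChain (fun a b => pvRx a b = false) l := by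
  intro l
  induction l with
  | nil => intro _; exact List.IsChain.nil
  | cons a r ih =>
    intro h
    cases r with
    | nil => exact List.IsChain.singleton a
    | cons b r' =>
      rw [pvStrip1] at h
      by_cases hab : pvReacts a b
      · rw [if_pos hab] at h; cases h
      · rw [if_neg hab] at h
        have h2 : pvStrip1 (b :: r') = none := by
          cases h3 : pvStrip1 (b :: r') with
          | none => rfl
          | some u => rw [h3] at h; cases h
        have hrx : pvRx a b = false := by
          rw [← pvReacts_eq]; simpa using hab
        exact List.isChain_cons_cons.mpr ⟨hrx, ih h2⟩

lemma strip1_length : ∀ (l l' : List Char), pvStrip1 l = some l' →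
    l.length = l'.length + 2 := by
  intro l
  induction l with
  | nil => intro l' h; cases h
  | cons a r ih =>
    intro l' h
    cases r with
    | nil => cases h
    | cons b r' =>
      rw [pvStrip1] at h
      by_cases hab : pvReacts a b
      · rw [if_pos hab] at h
        cases h
        simp
      · rw [if_neg hab] at h
        cases h2 : pvStrip1 (b :: r') with
        | none => rw [h2] at h; cases h
        | some u =>
          rw [h2] at h
          cases h
          have := ih u h2
          simp at this ⊢
          omega

-- a run over a list with no adjacent reacting pair pushes everything
lemma noPair_run : ∀ (l st : List Char),
    List.IsChain (fun a b => pvRx a b = false) l →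
    (∀ d c, st.head? = some d → l.head? = some c → pvRx d c = false) →
    pureRun st l = l.reverse ++ st := by
  intro l
  induction l with
  | nil => intro st _ _; simp [pureRun]
  | cons c r ih =>
    intro st hch hhd
    have hstep : pureStep st c = c :: st := by
      cases st with
      | nil => rfl
      | cons d t => simp [pureStep, hhd d c rfl rfl]
    show pureRun (pureStep st c) r = (c :: r).reverse ++ st
    rw [hstep, ih (c :: st) hch.tail
      (by intro d e hd he
          cases hd
          cases r with
          | nil => cases he
          | cons e' t => cases he; exact (List.isChain_cons_cons.mp hch).1)]
    simp

-- removing the leftmost adjacent reacting pair does not change the stack run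
lemma strip1_run : ∀ (l l' st : List Char), pvStrip1 l = some l' →
    (∀ d c, st.head? = some d → l.head? = some c → pvRx d c = false) →
    pureRun st l = pureRun st l' := by
  intro l
  induction l with
  | nil => intro l' st h _; cases h
  | cons a r ih =>
    intro l' st h hhd
    cases r with
    | nil => cases h
    | cons b r' =>
      rw [pvStrip1] at h
      have hstep : pureStep st a = a :: st := by
        cases st with
        | nil => rfl
        | cons d t => simp [pureStep, hhd d a rfl rfl]
      by_cases hab : pvReacts a b
      · rw [if_pos hab] at h
        obtain rfl : r' = l' := by injection h
        have hrx : pvRx a b = true := by rw [← pvReacts_eq]; exact hab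
        show pureRun (pureStep (pureStep st a) b) r' = pureRun st r'
        rw [hstep]
        simp [pureStep, hrx]
      · rw [if_neg hab] at h
        cases h2 : pvStrip1 (b :: r') with
        | none => rw [h2] at h; cases h
        | some u =>
          rw [h2] at h
          cases h
          have hrx : pvRx a b = false := by
            rw [← pvReacts_eq]; simpa using hab
          show pureRun (pureStep st a) (b :: r') = pureRun st (a :: u)
          rw [hstep, ih u (a :: st) h2
            (by intro d c hd hc; cases hd; cases hc; exact hrx)]
          show pureRun (a :: st) u = pureRun (pureStep st a) u
          rw [hstep]

-- the fixpoint check says exactly "the stack run empties"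
lemma fully_iff_run : ∀ (f : Nat) (l : List Char), l.length ≤ f →
    (pvFullyReacts f l = true ↔ pureRun [] l = []) := by
  intro f
  induction f with
  | zero =>
    intro l hl
    have : l = [] := List.length_eq_zero_iff.mp (by omega)
    subst this
    simp [pvFullyReacts, pureRun]
  | succ n ih =>
    intro l hl
    cases l with
    | nil => simp [pvFullyReacts, pureRun]
    | cons a r =>
      cases h : pvStrip1 (a :: r) with
      | some l' =>
        have heq : pvFullyReacts (n + 1) (a :: r) = pvFullyReacts n l' := by
          rw [pvFullyReacts.eq_def]; simp [h]
        rw [heq, strip1_run (a :: r) l' [] h (by intro d c hd; cases hd)]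
        exact ih l' (by have := strip1_length (a :: r) l' h; simp at this hl ⊢; omega)
      | none =>
        have heq : pvFullyReacts (n + 1) (a :: r) = false := by
          rw [pvFullyReacts.eq_def]; simp [h]
        rw [heq, noPair_run (a :: r) [] (strip1_none_chain (a :: r) h)
          (by intro d c hd; cases hd)]
        simp

lemma D_iff_quirk (s skip : String) : D_poly_reduce s skip ↔ pvQuirk skip s.toList = true := by
  unfold D_poly_reduce pvQuirk
  rw [lastAny_eq, Bool.and_eq_true]
  have hfil : (s.toList.filter fun c => !(PySem.Chars.lower [c] == skip.toList)) =
      (s.toList.filter fun c => !pvSk skip c) := by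
    apply List.filter_congr
    intro c _
    rw [skC_eq]
  constructor
  · rintro ⟨h1, h2⟩
    refine ⟨h1, ?_⟩
    rw [List.isEmpty_iff, run_filter skip s.toList []]
    rw [hfil] at h2
    exact (fully_iff_run s.toList.length _ (List.length_filter_le _ _)).mp h2
  · rintro ⟨h1, h2⟩
    refine ⟨h1, ?_⟩
    rw [hfil]
    apply (fully_iff_run s.toList.length _ (List.length_filter_le _ _)).mpr
    rw [← run_filter skip s.toList []]
    exact List.isEmpty_iff.mp h2

-- ===== VERDICT (by name: the statement is the Claim_ definition above) =====
theorem poly_reduce_spec : Claim_unchanged_poly_reduce := by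
  intro s skip _ hD
  have h := poly_reduce_eq s skip
  have hq : pvQuirk skip s.toList = false := by
    cases h' : pvQuirk skip s.toList with
    | false => rfl
    | true => exact absurd ((D_iff_quirk s skip).mpr h') hD
  simpa [Spec_poly_reduce, hq] using h

theorem poly_reduce_changed : Claim_changed_poly_reduce := by
  unfold Claim_changed_poly_reduce; decide

theorem poly_reduce_tight : Claim_exact_poly_reduce := by
  intro s skip _ hD
  have h := poly_reduce_eq s skip
  have hq : pvQuirk skip s.toList = true := (D_iff_quirk s skip).mp hD
  rw [h, hq]
  simp
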